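-- pv_equiv track=rewrite | github.com/milesreng/wordle-replica | removedumbwords.py | has_repeat
-- ===== SOURCE A (Python) =====
-- def has_repeat(words):
--     new_words = []
--     for word in words:
--         valid_word = True
--         for ch in word:
--             if word.count(ch) > 1:
--                 valid_word = False
--         if valid_word:
--             new_words.append(word)
--     return new_words
-- ===== SOURCE B (Python) =====
-- def has_repeat(words):
--     new_words = []
--     for word in words:
--         s = sorted(word)
--         valid_word = True
--         for a, b in zip(s, s[1:]):
--             if a == b:
--                 valid_word = False
--         if valid_word:
--             new_words.append(word)
--     return new_words
-- ===== Notes on version B (the rewrite author's own statement) =====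
-- stated objective: alternative
-- what changed: per-word duplicate detection by count-based rescans is replaced by sort-then-adjacent-equality scan
import Mathlib
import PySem

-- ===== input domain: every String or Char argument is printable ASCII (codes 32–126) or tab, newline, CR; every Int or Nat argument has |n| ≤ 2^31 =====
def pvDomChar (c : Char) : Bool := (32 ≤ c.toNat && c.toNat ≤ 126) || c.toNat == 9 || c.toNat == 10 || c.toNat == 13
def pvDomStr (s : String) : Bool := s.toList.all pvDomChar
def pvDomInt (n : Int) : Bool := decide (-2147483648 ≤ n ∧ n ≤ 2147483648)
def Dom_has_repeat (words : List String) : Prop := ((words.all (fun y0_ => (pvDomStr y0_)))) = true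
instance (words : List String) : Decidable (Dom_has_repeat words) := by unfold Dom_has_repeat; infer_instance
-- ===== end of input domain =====

-- B replaces A's per-character count-rescan duplicate test by sorting each word's
-- characters and scanning adjacent pairs once (alternative decomposition, same results).

-- ===== PORT A =====
def has_repeat (words : List String) : List String :=
  words.foldl (fun new_words word =>
    let valid_word := word.toList.foldl (fun v ch =>
      if PySem.Str.count word (String.ofList [ch]) > 1 then false else v) true
    if valid_word then new_words ++ [word] else new_words) []

-- ===== PORT B =====
def has_repeat_alt (words : List String) : List String :=
  words.foldl (fun new_words word =>
    let s := PySem.List.sorted word.toList (fun x => x) false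
    let valid_word := (s.zip (PySem.List.slice s (some 1) none)).foldl
      (fun v p => if p.1 == p.2 then false else v) true
    if valid_word then new_words ++ [word] else new_words) []

-- ===== PRECONDITION & SPEC =====
def Spec_has_repeat (words : List String) (out : List String) : Prop := out = has_repeat_alt words
instance (words : List String) (out : List String) : Decidable (Spec_has_repeat words out) := by unfold Spec_has_repeat; infer_instance

-- ===== CLAIM (what is proved, stated in full; the proofs are below) =====
def Claim_equal_has_repeat : Prop := ∀ (words : List String), Dom_has_repeat words → Spec_has_repeat words (has_repeat words)

-- ===== LEMMAS AND PROOFS =====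

-- Python s.count(sub) for a one-character sub is the element count (bridge for A's `word.count(ch)`).
theorem count_go_singleton (c : Char) (l : List Char) (fuel acc : Nat) (h : l.length ≤ fuel) :
    PySem.Chars.count.go [c] fuel l acc = acc + l.count c := by
  induction l generalizing fuel acc with
  | nil => cases fuel <;> simp [PySem.Chars.count.go]
  | cons x t ih =>
    cases fuel with
    | zero => simp at h
    | succ n =>
      simp only [PySem.Chars.count.go]
      by_cases hx : c = x
      · subst hx
        simp [List.isPrefixOf, ih _ _ (by simpa using h)]
        omega
      · simp [List.isPrefixOf, hx, ih _ _ (by simpa using h), Ne.symm hx]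

theorem count_singleton (cs : List Char) (c : Char) :
    PySem.Chars.count cs [c] = cs.count c := by
  simp [PySem.Chars.count, count_go_singleton c cs cs.length 0 le_rfl]

-- In a ≤-sorted list, no two adjacent elements are equal iff the list has no duplicates.
theorem any_adj_eq_false_iff (l : List Char) (hs : l.Pairwise (· ≤ ·)) :
    ((l.zip l.tail).any (fun p => p.1 == p.2) = false) ↔ l.Nodup := by
  induction l with
  | nil => simp
  | cons a t ih =>
    cases t with
    | nil => simp
    | cons b t2 =>
      have hp := List.pairwise_cons.mp hs
      have ih' := ih hp.2
      simp only [List.tail_cons, List.zip_cons_cons, List.any_cons, Bool.or_eq_false_iff,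
        List.nodup_cons, beq_eq_false_iff_ne, ne_eq] at *
      constructor
      · rintro ⟨hab, hrest⟩
        refine ⟨?_, ih'.mp hrest⟩
        intro hmem
        rcases List.mem_cons.mp hmem with h | h
        · exact hab h
        · have h1 : a ≤ b := hp.1 b (by simp)
          have h2 : b ≤ a := (List.pairwise_cons.mp hp.2).1 a h
          exact hab (le_antisymm h1 h2)
      · rintro ⟨hnm, hnd⟩
        exact ⟨fun h => hnm (h ▸ List.mem_cons_self), ih'.mpr hnd⟩

-- A's validity test for one word equals B's validity test for the same word.
theorem valid_eq (word : String) :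
    (word.toList.foldl (fun v ch =>
      if PySem.Str.count word (String.ofList [ch]) > 1 then false else v) true)
    = ((PySem.List.sorted word.toList (fun x => x) false).zip
        (PySem.List.slice (PySem.List.sorted word.toList (fun x => x) false) (some 1) none)).foldl
        (fun v p => if p.1 == p.2 then false else v) true := by
  have hslice : PySem.List.slice (PySem.List.sorted word.toList (fun x => x) false) (some 1) none
      = (PySem.List.sorted word.toList (fun x => x) false).tail := by
    rw [PySem.List.slice_from _ (by norm_num)]
    simp [List.drop_one]
  have hfunA : (fun (v : Bool) ch =>
      if PySem.Str.count word (String.ofList [ch]) > 1 then false else v)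
      = (fun v ch => if (fun ch => decide (PySem.Str.count word (String.ofList [ch]) > 1)) ch then false else v) := by
    funext v ch; simp
  rw [hslice, hfunA, PySem.List.foldl_if_false_eq, PySem.List.foldl_if_false_eq
    (p := fun p : Char × Char => p.1 == p.2)]
  have key : ∀ (b c : Bool), (b = false ↔ c = false) → b = c := by decide
  have hA : (word.toList.any fun ch => decide (PySem.Str.count word (String.ofList [ch]) > 1)) = false
      ↔ word.toList.Nodup := by
    simp only [List.any_eq_false, decide_eq_true_eq, not_lt]
    rw [List.nodup_iff_count_le_one]
    constructor
    · intro h a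
      by_cases ha : a ∈ word.toList
      · have := h a ha
        simpa [count_singleton] using this
      · simp [List.count_eq_zero_of_not_mem ha]
    · intro h ch _
      simpa [count_singleton] using h ch
  have hB : (((PySem.List.sorted word.toList (fun x => x) false).zip
        (PySem.List.sorted word.toList (fun x => x) false).tail).any fun p => p.1 == p.2) = false
      ↔ word.toList.Nodup := by
    rw [any_adj_eq_false_iff _ (by simpa using PySem.List.sorted_pairwise word.toList (fun x => x))]
    exact (PySem.List.sorted_perm word.toList (fun x => x) false).nodup_iff
  simp only [Bool.true_and]
  exact congrArg (fun b => !b) (key _ _ (hA.trans hB.symm))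

-- ===== VERDICT (by name: the statement is the Claim_ definition above) =====
theorem has_repeat_spec : Claim_equal_has_repeat := by
  intro words _
  show has_repeat words = has_repeat_alt words
  unfold has_repeat has_repeat_alt
  apply PySem.List.foldl_congr_mem
  intro acc word _
  simp only
  rw [valid_eq]
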